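-- pv_equiv track=rewrite | github.com/pypi-data/pypi-mirror-396 | packages/misato/misato-0.8.9.tar.gz/misato-0.8.9/misato/utils.py | split_integer_into_intervals
-- ===== SOURCE A (Python) =====
-- from typing import List, Tuple, Optional
--
-- def split_integer_into_intervals(total: int, parts: int) -> List[Tuple[int, int]]:
--     """
--     Split an integer into roughly equal intervals for parallel processing.
--
--     Args:
--         total: Total number to split (e.g., number of segments)
--         parts: Number of intervals (e.g., number of threads)
--
--     Returns:
--         List of (start, end) tuples, where end is exclusive
--     """
--     if parts <= 0:
--         raise ValueError("parts must be positive")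
--     if total == 0:
--         return [(0, 0)] * parts
--
--     quotient = total // parts
--     remainder = total % parts
--
--     intervals: List[Tuple[int, int]] = []
--     start = 0
--     for i in range(parts):
--         extra = 1 if i < remainder else 0
--         end = start + quotient + extra
--         intervals.append((start, end))
--         start = end
--
--     return intervals
-- ===== SOURCE B (Python) =====
-- def split_integer_into_intervals(total: int, parts: int):
--     if parts <= 0:
--         raise ValueError("parts must be positive")
--     quotient, remainder = divmod(total, parts)
--     b = [i * quotient + min(i, remainder) for i in range(parts + 1)]
--     return list(zip(b, b[1:]))
-- ===== Notes on version B (the rewrite author's own statement) =====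
-- stated objective: simpler
-- what changed: Replaces the loop-carried running-start accumulator with a closed-form boundary list b[i] = i*quotient + min(i, remainder) paired by zip(b, b[1:]); the explicit total==0 branch disappears.
import Mathlib
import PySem

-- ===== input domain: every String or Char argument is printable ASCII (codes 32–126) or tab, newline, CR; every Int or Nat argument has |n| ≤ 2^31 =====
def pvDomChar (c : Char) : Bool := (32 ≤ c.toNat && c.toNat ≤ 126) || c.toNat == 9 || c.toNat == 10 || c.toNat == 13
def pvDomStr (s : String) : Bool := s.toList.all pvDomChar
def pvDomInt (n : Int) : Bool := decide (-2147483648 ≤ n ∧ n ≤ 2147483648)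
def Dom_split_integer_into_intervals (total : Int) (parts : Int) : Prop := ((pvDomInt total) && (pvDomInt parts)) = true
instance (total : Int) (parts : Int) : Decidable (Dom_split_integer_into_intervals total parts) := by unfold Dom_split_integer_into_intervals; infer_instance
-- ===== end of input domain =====

-- B computes the interval boundaries by a closed formula and pairs them with zip, instead of
-- A's loop-carried running start; same cost, simpler ("simpler" objective, no speed claim).

-- ===== PORT A =====
def split_integer_into_intervals (total : Int) (parts : Int) : List (Int × Int) :=
  -- 'if parts <= 0: raise ValueError' is excluded by Pre_ below
  if total == 0 then List.replicate parts.toNat ((0 : Int), (0 : Int))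
  else
    let quotient := PySem.Int.floordiv total parts
    let remainder := PySem.Int.mod total parts
    let st := (PySem.List.pyRange 0 parts 1).foldl
      (fun (st : List (Int × Int) × Int) i =>
        let extra : Int := if i < remainder then 1 else 0
        let e := st.2 + quotient + extra
        (st.1 ++ [(st.2, e)], e)) ([], 0)
    st.1

-- ===== PORT B =====
def split_integer_into_intervals_alt (total : Int) (parts : Int) : List (Int × Int) :=
  -- 'if parts <= 0: raise ValueError' is excluded by Pre_ below
  match PySem.Int.divmod? total parts with
  | none => []   -- unreachable under Pre_ (parts ≠ 0)
  | some (quotient, remainder) =>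
    let b := (PySem.List.pyRange 0 (parts + 1) 1).map (fun i => i * quotient + min i remainder)
    b.zip (PySem.List.slice b (some 1) none)

-- ===== PRECONDITION & SPEC =====
-- Pre_ excludes exactly parts ≤ 0, where Python A raises ValueError.
def Pre_split_integer_into_intervals (total : Int) (parts : Int) : Prop := 1 ≤ parts
instance (total : Int) (parts : Int) : Decidable (Pre_split_integer_into_intervals total parts) := by unfold Pre_split_integer_into_intervals; infer_instance
def pvWitness_split_integer_into_intervals : Int × Int := (10, 3)

def Spec_split_integer_into_intervals (total : Int) (parts : Int) (out : List (Int × Int)) : Prop := out = split_integer_into_intervals_alt total parts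
instance (total : Int) (parts : Int) (out : List (Int × Int)) : Decidable (Spec_split_integer_into_intervals total parts out) := by unfold Spec_split_integer_into_intervals; infer_instance

-- ===== CLAIM (what is proved, stated in full; the proofs are below) =====
def Claim_equal_split_integer_into_intervals : Prop := ∀ (total : Int) (parts : Int), Dom_split_integer_into_intervals total parts → Pre_split_integer_into_intervals total parts → Spec_split_integer_into_intervals total parts (split_integer_into_intervals total parts)

-- ===== LEMMAS AND PROOFS =====

-- boundary formula
def pvF (q r : Int) (k : Nat) : Int := (k : Int) * q + min (k : Int) r

-- A's loop, unfolded over List.range, produces the pairs of consecutive boundaries.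
lemma pvLoop_eq (q r : Int) (hr : 0 ≤ r) (n : Nat) :
    ((List.range n).map (Nat.cast : Nat → Int)).foldl
      (fun (st : List (Int × Int) × Int) i =>
        let extra : Int := if i < r then 1 else 0
        let e := st.2 + q + extra
        (st.1 ++ [(st.2, e)], e)) ([], 0)
    = ((List.range n).map (fun k => (pvF q r k, pvF q r (k + 1))), pvF q r n) := by
  induction n with
  | zero => simp [pvF, hr]
  | succ n ih =>
    rw [List.range_succ, List.map_append, List.foldl_append, ih, List.map_append]
    have hstep : pvF q r n + q + (if (n : Int) < r then 1 else 0) = pvF q r (n + 1) := by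
      simp only [pvF]
      push_cast
      rw [add_mul, one_mul]
      split_ifs <;> omega
    simp only [List.map_cons, List.map_nil, List.foldl_cons, List.foldl_nil]
    rw [hstep]

-- zip of a mapped range with its tail pairs consecutive values.
lemma pvZip_tail (g : Nat → Int) (n : Nat) :
    (((List.range (n + 1)).map g).zip (((List.range (n + 1)).map g).tail))
    = (List.range n).map (fun k => (g k, g (k + 1))) := by
  apply List.ext_getElem
  · simp
  · intro k h1 h2
    have hk : k < n := by simpa using h2
    simp [List.getElem_zip, List.getElem_tail]

-- ===== VERDICT (by name: the statement is the Claim_ definition above) =====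
theorem split_integer_into_intervals_spec : Claim_equal_split_integer_into_intervals := by
  intro total parts _ hpre
  have hp : (0 : Int) < parts := hpre
  have hp0 : parts ≠ 0 := by omega
  unfold Spec_split_integer_into_intervals
  unfold split_integer_into_intervals split_integer_into_intervals_alt
  have hdm : PySem.Int.divmod? total parts
      = some (PySem.Int.floordiv total parts, PySem.Int.mod total parts) := by
    simp [PySem.Int.divmod?, PySem.Int.floordiv, PySem.Int.mod, hp0]
  rw [hdm]
  set q := PySem.Int.floordiv total parts with hq
  set r := PySem.Int.mod total parts with hr
  have hr0 : 0 ≤ r := PySem.Int.mod_nonneg total hp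
  obtain ⟨n, hpn, hn1⟩ : ∃ n : Nat, parts = (n : Int) ∧ 1 ≤ n := ⟨parts.toNat, by omega, by omega⟩
  have hrange1 : PySem.List.pyRange 0 parts 1 = (List.range n).map (Nat.cast : Nat → Int) := by
    rw [PySem.List.pyRange_one]
    simp [hpn]
  have hrange2 : PySem.List.pyRange 0 (parts + 1) 1
      = (List.range (n + 1)).map (Nat.cast : Nat → Int) := by
    rw [PySem.List.pyRange_one]
    have h1 : (parts + 1 - 0).toNat = n + 1 := by omega
    rw [h1]
    simp
  simp only [hrange1, hrange2, PySem.List.slice_from_one, List.map_map, Function.comp_def]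
  rw [pvZip_tail (fun k : Nat => (k : Int) * q + min (k : Int) r) n]
  have hloop := pvLoop_eq q r hr0 n
  simp only [pvF] at hloop
  by_cases h0 : total = 0
  · -- A's special branch: all boundaries are 0 since q = r = 0
    have hq0 : q = 0 := by rw [hq, h0]; simp [PySem.Int.floordiv]
    have hr0' : r = 0 := by rw [hr, h0]; simp [PySem.Int.mod]
    subst h0
    simp only [beq_self_eq_true, if_true, hq0, hr0']
    apply List.ext_getElem
    · simp [hpn]
    · intro k h1 h2
      have hmin : min ((k : Int)) 0 = 0 := by omega
      have hmin' : min (((k : Nat) : Int) + 1) 0 = 0 := by omega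
      simp [hmin']
  · simp only [beq_iff_eq, h0, if_false]
    rw [hloop]
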